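-- pv_equiv track=rewrite | github.com/42LoCo42/nonono | python/4gewinnt.py | all_len4_slices
-- ===== SOURCE A (Python) =====
-- def at(list, ix):
--     return None if ix < 0 or ix >= len(list) else list[ix]
--
-- def generalized_at(multidim, *args):
--     val = multidim
--     for ix in args:
--         val = at(val, ix)
--         if val == None:
--             return None
--     return val
--
-- def generalized_slice(multidim, startixes, increments, count):
--     data = []
--     for c in range(0, count):
--         data.append(generalized_at(multidim, *startixes))
--         startixes = list(map(sum, zip(startixes, increments)))
--     return data
--
-- def all_len4_slices(multidim, x, y):
--     slices = []
--     for i in range(-3, 1):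
--         slices.append(generalized_slice(multidim, [y, x + i], [0, 1], 4))
--         slices.append(generalized_slice(multidim, [y + i, x], [1, 0], 4))
--         slices.append(generalized_slice(multidim, [y + i, x + i], [1, 1], 4))
--         slices.append(generalized_slice(multidim, [y - i, x + i], [-1, 1], 4))
--     return slices
-- ===== SOURCE B (Python) =====
-- def all_len4_slices(multidim, x, y):
--     def cell(r, c):
--         if 0 <= r < len(multidim):
--             row = multidim[r]
--             if 0 <= c < len(row):
--                 return row[c]
--         return None
--     horiz = [cell(y, x + k) for k in range(-3, 4)]
--     vert  = [cell(y + k, x) for k in range(-3, 4)]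
--     diag  = [cell(y + k, x + k) for k in range(-3, 4)]
--     anti  = [cell(y - k, x + k) for k in range(-3, 4)]
--     out = []
--     for j in range(4):
--         for line in (horiz, vert, diag, anti):
--             out.append(line[j:j + 4])
--     return out
-- ===== Notes on version B (the rewrite author's own statement) =====
-- stated objective: simpler
-- what changed: Instead of A's 16 independent 4-step walks (each re-deriving its start from an offset and stepping a startixes list), B builds one 7-cell bounds-checked line per direction centered on (x,y) and emits the 16 answers as length-4 sliding windows of those four lines, interleaved in A's offset order.
import Mathlib
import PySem

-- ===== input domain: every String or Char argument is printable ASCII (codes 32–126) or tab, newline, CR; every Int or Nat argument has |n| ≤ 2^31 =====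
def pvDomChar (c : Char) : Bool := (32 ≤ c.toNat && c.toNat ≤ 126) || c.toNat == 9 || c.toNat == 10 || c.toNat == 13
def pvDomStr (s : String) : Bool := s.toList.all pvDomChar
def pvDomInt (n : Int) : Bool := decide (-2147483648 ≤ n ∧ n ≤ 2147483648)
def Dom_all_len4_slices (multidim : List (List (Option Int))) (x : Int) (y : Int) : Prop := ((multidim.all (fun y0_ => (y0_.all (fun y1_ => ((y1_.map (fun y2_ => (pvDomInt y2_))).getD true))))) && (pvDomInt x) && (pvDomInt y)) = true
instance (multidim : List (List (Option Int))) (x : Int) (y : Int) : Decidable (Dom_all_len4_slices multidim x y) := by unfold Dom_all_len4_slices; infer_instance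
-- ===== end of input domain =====

-- B builds, once per direction, one 7-cell bounds-checked line through (x,y) and emits the 16
-- answers as its length-4 sliding windows, instead of A's 16 independent stepped walks (objective: simpler).

-- ===== PORT A =====
-- at(list, ix): None if out of range else list[ix]  (Option = value-or-None)
def pvAt {α : Type} (l : List α) (ix : Int) : Option α :=
  if ix < 0 ∨ ix ≥ (l.length : Int) then none else PySem.List.pyGet? l ix

-- generalized_at(multidim, y, x): A's variadic loop unrolled for the 2-index use in this file
-- (the 'val == None' early return after each step is the match on none / the final if).
def generalized_at (multidim : List (List (Option Int))) (y x : Int) : Option Int :=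
  match pvAt multidim y with
  | none => none
  | some row =>
    match pvAt row x with
    | none => none
    | some cell => if cell = none then none else cell

-- generalized_slice(multidim, [sy, sx], [iy, ix], count): the startixes pair is the fold state.
def generalized_slice (multidim : List (List (Option Int))) (sy sx iy ix : Int) (count : Nat) :
    List (Option Int) :=
  ((List.range count).foldl
    (fun (st : List (Option Int) × Int × Int) _ =>
      (st.1 ++ [generalized_at multidim st.2.1 st.2.2], st.2.1 + iy, st.2.2 + ix))
    ([], sy, sx)).1

def all_len4_slices (multidim : List (List (Option Int))) (x : Int) (y : Int) :
    List (List (Option Int)) :=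
  (PySem.List.pyRange (-3) 1 1).foldl
    (fun slices i =>
      slices ++ [generalized_slice multidim y (x + i) 0 1 4]
             ++ [generalized_slice multidim (y + i) x 1 0 4]
             ++ [generalized_slice multidim (y + i) (x + i) 1 1 4]
             ++ [generalized_slice multidim (y - i) (x + i) (-1) 1 4])
    []

-- ===== PORT B =====
-- cell(r, c): the 2D bounds-checked lookup of Source B
def pvCell (multidim : List (List (Option Int))) (r c : Int) : Option Int :=
  if 0 ≤ r ∧ r < (multidim.length : Int) then
    let row := (PySem.List.pyGet? multidim r).getD []
    if 0 ≤ c ∧ c < (row.length : Int) then (PySem.List.pyGet? row c).getD none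
    else none
  else none

def all_len4_slices_alt (multidim : List (List (Option Int))) (x : Int) (y : Int) :
    List (List (Option Int)) :=
  let horiz := (PySem.List.pyRange (-3) 4 1).map (fun k => pvCell multidim y (x + k))
  let vert  := (PySem.List.pyRange (-3) 4 1).map (fun k => pvCell multidim (y + k) x)
  let diag  := (PySem.List.pyRange (-3) 4 1).map (fun k => pvCell multidim (y + k) (x + k))
  let anti  := (PySem.List.pyRange (-3) 4 1).map (fun k => pvCell multidim (y - k) (x + k))
  (List.range 4).foldl
    (fun out j =>
      [horiz, vert, diag, anti].foldl
        (fun out line => out ++ [PySem.List.slice line (some (j : Int)) (some ((j : Int) + 4))])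
        out)
    []

-- ===== PRECONDITION & SPEC =====
def Spec_all_len4_slices (multidim : List (List (Option Int))) (x : Int) (y : Int) (out : List (List (Option Int))) : Prop := out = all_len4_slices_alt multidim x y
instance (multidim : List (List (Option Int))) (x : Int) (y : Int) (out : List (List (Option Int))) : Decidable (Spec_all_len4_slices multidim x y out) := by unfold Spec_all_len4_slices; infer_instance

-- ===== CLAIM (what is proved, stated in full; the proofs are below) =====
def Claim_equal_all_len4_slices : Prop := ∀ (multidim : List (List (Option Int))) (x : Int) (y : Int), Dom_all_len4_slices multidim x y → Spec_all_len4_slices multidim x y (all_len4_slices multidim x y)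

-- ===== LEMMAS AND PROOFS =====

lemma ga_eq_cell (m : List (List (Option Int))) (r c : Int) :
    generalized_at m r c = pvCell m r c := by
  unfold generalized_at pvCell pvAt
  by_cases hr : 0 ≤ r ∧ r < (m.length : Int)
  · rw [if_neg (by omega), if_pos hr]
    rcases PySem.List.pyGet?_eq_some_getElem (xs := m) hr.1 hr.2 with h
    rw [h]
    simp only [Option.getD_some]
    by_cases hc : 0 ≤ c ∧ c < ((m[r.toNat].length : Int))
    · rw [if_neg (by omega), if_pos hc]
      have h2 := PySem.List.pyGet?_eq_some_getElem (xs := m[r.toNat]) hc.1 hc.2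
      rw [h2]
      simp only [Option.getD_some]
      split_ifs with h0 <;> simp [h0]
    · rw [if_pos (by omega), if_neg hc]
  · rw [if_pos (by omega), if_neg hr]

lemma pyRange_m3_1 : PySem.List.pyRange (-3) 1 1 = [-3, -2, -1, 0] := by decide
lemma pyRange_m3_4 : PySem.List.pyRange (-3) 4 1 = [-3, -2, -1, 0, 1, 2, 3] := by decide

-- ===== VERDICT (by name: the statement is the Claim_ definition above) =====
theorem all_len4_slices_spec : Claim_equal_all_len4_slices := by
  intro m x y _
  show all_len4_slices m x y = all_len4_slices_alt m x y
  unfold all_len4_slices all_len4_slices_alt generalized_slice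
  rw [pyRange_m3_1, pyRange_m3_4]
  simp only [List.foldl, List.map, List.range, List.range.loop, PySem.List.slice,
    List.nil_append, List.cons_append, ga_eq_cell]
  norm_num [PySem.List.slice?, List.drop, List.take]
  ring_nf
  and_intros <;> rfl
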